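-- pv_equiv track=rewrite | github.com/ccaroon/advent-of-code | 2024/day01/puzzle2.py | sim_score
-- ===== SOURCE A (Python) =====
-- def sim_score(left:list[int], right:list[int]) -> int:
--     """
--     Calculate a total similarity score by adding up each number in the left
--     list after multiplying it by the number of times that number appears in the
--     right list.
--
--     >>> sim_score([3,4,2,1,3,3], [4,3,5,3,9,3])
--     31
--     """
--     score = 0
--     counts = {}
--
--     # Count the number of times a number in the `left` list appears in the
--     # `right` list.
--     for idx in range(len(left)):
--         lnum = left[idx]
--         # does the number appear in the `right` list?
--         # have we already counted it?
--         # Yes & No -> add it to `counts`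
--         if lnum in right and lnum not in counts:
--             # update `counts`
--             counts[lnum] = right.count(lnum)
--
--     # Calculate score
--     for idx in range(len(left)):
--         lnum = left[idx]
--         score += lnum * counts.get(lnum, 0)
--
--     return score
-- ===== SOURCE B (Python) =====
-- def sim_score(left: list[int], right: list[int]) -> int:
--     # Frequency tables for both lists, then one pass over left's distinct values.
--     lc = {}
--     for v in left:
--         lc[v] = lc.get(v, 0) + 1
--     rc = {}
--     for v in right:
--         rc[v] = rc.get(v, 0) + 1
--     score = 0
--     for v, c in lc.items():
--         score += v * c * rc.get(v, 0)
--     return score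
-- ===== Notes on version B (the rewrite author's own statement) =====
-- stated objective: faster
-- what changed: B builds frequency tables for both lists in one pass each and sums v * leftcount(v) * rightcount(v) over left's distinct values, instead of A's per-element membership test and right.count scan plus a second element-by-element pass over left.
import Mathlib
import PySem

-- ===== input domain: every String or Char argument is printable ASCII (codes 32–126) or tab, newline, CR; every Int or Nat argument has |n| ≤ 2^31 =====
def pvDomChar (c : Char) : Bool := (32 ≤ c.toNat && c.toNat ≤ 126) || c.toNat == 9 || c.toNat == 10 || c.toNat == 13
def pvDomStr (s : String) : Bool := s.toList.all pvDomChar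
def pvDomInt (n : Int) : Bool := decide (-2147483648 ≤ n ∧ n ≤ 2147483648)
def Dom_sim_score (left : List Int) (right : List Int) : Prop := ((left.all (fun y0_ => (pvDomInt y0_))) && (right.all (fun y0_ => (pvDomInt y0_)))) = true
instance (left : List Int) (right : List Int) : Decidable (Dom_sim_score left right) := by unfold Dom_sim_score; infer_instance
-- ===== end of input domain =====

-- B replaces A's per-element `in right` / right.count scans by two one-pass frequency
-- tables and a single pass over left's distinct values (objective: faster).

-- ===== PORT A =====
def sim_score (left : List Int) (right : List Int) : Int :=
  let counts : PySem.Dict Int Int :=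
    (PySem.List.pyRange 0 (left.length : Int) 1).foldl (fun d idx =>
      let lnum := PySem.List.pyGetD left idx 0
      if right.contains lnum && !(d.contains lnum) then
        d.insert lnum ((PySem.List.count right lnum : Nat) : Int)
      else d) PySem.Dict.empty
  (PySem.List.pyRange 0 (left.length : Int) 1).foldl (fun score idx =>
    let lnum := PySem.List.pyGetD left idx 0
    score + lnum * counts.getD lnum 0) 0

-- ===== PORT B =====
def sim_score_alt (left : List Int) (right : List Int) : Int :=
  let lc : PySem.Dict Int Int :=
    left.foldl (fun d v => d.insert v (d.getD v 0 + 1)) PySem.Dict.empty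
  let rc : PySem.Dict Int Int :=
    right.foldl (fun d v => d.insert v (d.getD v 0 + 1)) PySem.Dict.empty
  lc.items.foldl (fun score p => score + p.1 * p.2 * rc.getD p.1 0) 0

-- ===== PRECONDITION & SPEC =====
def Spec_sim_score (left : List Int) (right : List Int) (out : Int) : Prop := out = sim_score_alt left right
instance (left : List Int) (right : List Int) (out : Int) : Decidable (Spec_sim_score left right out) := by unfold Spec_sim_score; infer_instance

-- ===== CLAIM (what is proved, stated in full; the proofs are below) =====
def Claim_equal_sim_score : Prop := ∀ (left : List Int) (right : List Int), Dom_sim_score left right → Spec_sim_score left right (sim_score left right)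

-- ===== LEMMAS AND PROOFS =====

-- abbreviation for A's dict-building loop body (proof-local)
def aStep (right : List Int) (d : PySem.Dict Int Int) (x : Int) : PySem.Dict Int Int :=
  if right.contains x && !(d.contains x) then
    d.insert x ((PySem.List.count right x : Nat) : Int)
  else d

theorem getD_aFold (right : List Int) (v : Int) :
    ∀ (l : List Int) (d : PySem.Dict Int Int),
    ((l.foldl (aStep right) d).getD v 0)
      = if d.contains v then d.getD v 0
        else if v ∈ l ∧ v ∈ right then ((right.count v : Nat) : Int) else 0 := by
  intro l
  induction l with
  | nil =>
    intro d
    by_cases h : d.contains v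
    · simp [h]
    · have h' : d.contains v = false := by simpa using h
      simp only [h', Bool.false_eq_true, if_false]
      exact PySem.Dict.getD_of_not_contains _ _ h'
  | cons x t ih =>
    intro d
    rw [List.foldl_cons, ih]
    unfold aStep
    by_cases hc : (right.contains x && !(d.contains x)) = true
    · have hrx : x ∈ right := List.contains_iff_mem.mp (by
        have := hc; simp only [Bool.and_eq_true] at this; exact this.1)
      have hdx : d.contains x = false := by
        have := hc; simp only [Bool.and_eq_true, Bool.not_eq_true'] at this; exact this.2
      simp only [hc, if_true]
      by_cases hx : v = x
      · subst hx
        rw [PySem.Dict.contains_insert_self, PySem.Dict.getD_insert_self]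
        simp [hdx, hrx]
      · rw [PySem.Dict.contains_insert, PySem.Dict.getD_insert]
        have hbe : (v == x) = false := by simp [hx]
        simp only [hbe, Bool.false_or, if_neg hx]
        by_cases ha : d.contains v
        · simp [ha]
        · simp only [ha, Bool.false_eq_true, if_false]
          have : (v ∈ x :: t) ↔ v ∈ t := by simp [hx]
          simp [this]
    · simp only [hc, Bool.false_eq_true, if_false]
      by_cases ha : d.contains v
      · simp [ha]
      · simp only [ha, Bool.false_eq_true, if_false]
        by_cases hx : v = x
        · subst hx
          have ha' : d.contains v = false := by simpa using ha
          have hr' : v ∉ right := by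
            intro hmem
            simp [ha'] at hc
            exact hc hmem
          simp [hr']
        · have : (v ∈ x :: t) ↔ v ∈ t := by simp [hx]
          simp [this]

-- sum over a nodup covering list of "if v = x then f v else 0" picks out f x
theorem sum_map_ite_eq (x : Int) (f : Int → Int) :
    ∀ (S : List Int), S.Nodup → x ∈ S →
    (S.map (fun v => if v = x then f v else 0)).sum = f x := by
  intro S
  induction S with
  | nil => intro _ hx; cases hx
  | cons s ss ih =>
    intro hnd hx
    rcases List.mem_cons.mp hx with h | h
    · subst h
      have hnot : x ∉ ss := (List.nodup_cons.mp hnd).1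
      have hz : (ss.map (fun v => if v = x then f v else 0)).sum = 0 := by
        rw [List.map_congr_left (g := fun _ => (0 : Int))]
        · simp
        · intro a ha
          have hax : a ≠ x := fun h => hnot (h ▸ ha)
          simp [hax]
      simp [hz]
    · have hs : s ≠ x := by
        intro h; subst h; exact (List.nodup_cons.mp hnd).1 h
      simp only [List.map_cons, List.sum_cons, if_neg hs, zero_add]
      exact ih (List.nodup_cons.mp hnd).2 h

-- grouping: sum of f over l equals sum over distinct values of count * f
theorem sum_group (S : List Int) (f : Int → Int) (hnd : S.Nodup) :
    ∀ (l : List Int), (∀ x ∈ l, x ∈ S) →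
    (S.map (fun v => ((l.count v : Nat) : Int) * f v)).sum = (l.map f).sum := by
  intro l
  induction l with
  | nil =>
    intro _
    rw [List.map_congr_left (g := fun _ => (0 : Int))]
    · simp
    · intro a _; simp
  | cons x t ih =>
    intro hcov
    have hx : x ∈ S := hcov x List.mem_cons_self
    have hcov' : ∀ y ∈ t, y ∈ S := fun y hy => hcov y (List.mem_cons_of_mem x hy)
    have hsplit : ∀ v : Int, (((x :: t).count v : Nat) : Int) * f v
        = ((t.count v : Nat) : Int) * f v + (if v = x then f v else 0) := by
      intro v
      rw [List.count_cons]
      by_cases hv : v = x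
      · simp [hv]; ring
      · have hbe : (v == x) = false := by simp [hv]
        have hbe2 : (x == v) = false := by
          simp only [beq_eq_false_iff_ne, ne_eq]
          exact fun h => hv h.symm
        simp [hbe2, hv]
    rw [List.map_congr_left (g := fun v => ((t.count v : Nat) : Int) * f v + (if v = x then f v else 0)) (fun v _ => hsplit v)]
    rw [PySem.List.sum_map_add_int, ih hcov', sum_map_ite_eq x f S hnd hx]
    simp [add_comm]

theorem sim_score_spec' : ∀ (left right : List Int),
    sim_score left right = sim_score_alt left right := by
  intro left right
  unfold sim_score sim_score_alt
  simp only []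
  rw [PySem.List.foldl_pyRange_zero_pyGetD'
        (f := fun (score lnum : Int) => score + lnum *
          ((List.foldl (fun (d : PySem.Dict Int Int) idx =>
              if right.contains (PySem.List.pyGetD left idx 0)
                  && !(d.contains (PySem.List.pyGetD left idx 0)) then
                d.insert (PySem.List.pyGetD left idx 0)
                  ((PySem.List.count right (PySem.List.pyGetD left idx 0) : Nat) : Int)
              else d)
            PySem.Dict.empty (PySem.List.pyRange 0 (left.length : Int) 1)).getD lnum 0))
        (d := (0 : Int))]
  rw [PySem.List.foldl_pyRange_zero_pyGetD'
        (f := fun (d : PySem.Dict Int Int) (lnum : Int) =>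
          if right.contains lnum && !(d.contains lnum) then
            d.insert lnum ((PySem.List.count right lnum : Nat) : Int)
          else d)
        (d := (0 : Int))]
  rw [show (fun (d : PySem.Dict Int Int) (lnum : Int) =>
          if right.contains lnum && !(d.contains lnum) then
            d.insert lnum ((PySem.List.count right lnum : Nat) : Int)
          else d) = aStep right from rfl]
  rw [PySem.List.foldl_add
        (g := fun x => x * ((left.foldl (aStep right) PySem.Dict.empty).getD x 0))]
  rw [PySem.Dict.foldl_insert_getD_add_one_eq_counter]
  rw [PySem.Dict.foldl_insert_getD_add_one_eq_counter]
  rw [PySem.List.foldl_add (g := fun p : Int × Int =>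
        p.1 * p.2 * ((PySem.Dict.counter right).getD p.1 0))]
  rw [PySem.Dict.items_counter, List.map_map]
  have hA : ∀ x ∈ left,
      x * ((left.foldl (aStep right) PySem.Dict.empty).getD x 0)
        = x * ((right.count x : Nat) : Int) := by
    intro x hxl
    rw [getD_aFold]
    by_cases hr : x ∈ right
    · simp [hxl, hr]
    · simp [hr, List.count_eq_zero_of_not_mem hr]
  have hB : ∀ v ∈ PySem.Set.ofList left,
      ((fun p : Int × Int => p.1 * p.2 * ((PySem.Dict.counter right).getD p.1 0))
        ∘ (fun k => (k, (left.count k : Int)))) v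
        = ((left.count v : Nat) : Int) * (v * ((right.count v : Nat) : Int)) := by
    intro v _
    simp only [Function.comp]
    rw [PySem.Dict.getD_counter]
    ring
  rw [List.map_congr_left (fun x hx => hA x hx)]
  rw [List.map_congr_left hB]
  rw [sum_group (PySem.Set.ofList left) (fun x => x * ((right.count x : Nat) : Int))
        (PySem.Set.nodup_ofList left) left (fun x hx => (PySem.Set.mem_ofList left x).mpr hx)]

-- ===== VERDICT (by name: the statement is the Claim_ definition above) =====
theorem sim_score_spec : Claim_equal_sim_score := by
  intro left right _
  show _ = _
  exact sim_score_spec' left right
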